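-- pv_equiv track=rewrite | github.com/Lakshmi-42469/Test-Case-Generator | test_case_logic.py | generate_test_case
-- ===== SOURCE A (Python) =====
-- def generate_test_case(requirement_text):
--     lines = requirement_text.strip().split(".")
--     test_cases = []
--     tc_counter = 1
--
--     for line in lines:
--         line = line.strip().lower()
--         if not line:
--             continue
--
--         if "login" in line or "email" in line:
--             test_cases.append(f"TC_{tc_counter:03}: Enter valid email and password -> Login Successful")
--             tc_counter += 1
--             test_cases.append(f"TC_{tc_counter:03}: enter invalid password -> Show Error Message")
--             tc_counter += 1
--             test_cases.append(f"TC_{tc_counter:03}: Leave email field -> show required field message")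
--             tc_counter += 1
--         if "submit" in line:
--             test_cases.append(f"TC_{tc_counter:03}: click submit without filling fields -> show error message")
--             tc_counter += 1
--         if "password" in line:
--             test_cases.append(f"TC_{tc_counter:03}: Enter special characters in password field -> reject login attempt")
--             tc_counter += 1
--     if not test_cases:
--         test_cases.append("No specific testcases generated from the input.")
--     return test_cases
-- ===== SOURCE B (Python) =====
-- KEYWORD_BITS = {"login": 1, "email": 1, "submit": 2, "password": 4}
--
-- _T_LOGIN = ["Enter valid email and password -> Login Successful",
--             "enter invalid password -> Show Error Message",
--             "Leave email field -> show required field message"]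
-- _T_SUBMIT = ["click submit without filling fields -> show error message"]
-- _T_PASSWORD = ["Enter special characters in password field -> reject login attempt"]
--
-- BODIES_BY_MASK = {m: (_T_LOGIN if m & 1 else [])
--                      + (_T_SUBMIT if m & 2 else [])
--                      + (_T_PASSWORD if m & 4 else [])
--                   for m in range(8)}
--
--
-- def generate_test_case(requirement_text):
--     lines = [l.strip().lower() for l in requirement_text.strip().split(".")]
--     # keyword-major: one pass over all lines per keyword, OR-ing a bit into per-line masks
--     masks = [0] * len(lines)
--     for kw, bit in KEYWORD_BITS.items():
--         masks = [m | bit if kw in line else m for m, line in zip(masks, lines)]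
--     # expand each line's mask through the precomputed table, then number positionally
--     bodies = [b for m in masks for b in BODIES_BY_MASK[m]]
--     if not bodies:
--         return ["No specific testcases generated from the input."]
--     return [f"TC_{n:03}: {b}" for n, b in enumerate(bodies, 1)]
-- ===== Notes on version B (the rewrite author's own statement) =====
-- stated objective: alternative
-- what changed: Replaces A's line-major loop with interleaved keyword branches and a mutable counter by a keyword-major design: one boolean pass per keyword ORs a bit into per-line masks, a precomputed mask->template-bodies table (BODIES_BY_MASK over range(8)) expands each line, and a final enumerate pass numbers the bodies positionally.
import Mathlib
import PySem

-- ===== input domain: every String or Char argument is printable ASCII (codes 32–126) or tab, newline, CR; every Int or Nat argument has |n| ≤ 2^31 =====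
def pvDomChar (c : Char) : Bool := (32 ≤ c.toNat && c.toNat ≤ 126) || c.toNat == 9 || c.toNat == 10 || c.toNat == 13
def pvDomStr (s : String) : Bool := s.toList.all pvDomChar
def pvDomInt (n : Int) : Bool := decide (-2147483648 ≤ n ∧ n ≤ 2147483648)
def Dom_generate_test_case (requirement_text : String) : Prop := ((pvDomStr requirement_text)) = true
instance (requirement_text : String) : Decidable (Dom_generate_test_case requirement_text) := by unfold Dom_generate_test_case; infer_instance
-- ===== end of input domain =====

-- B replaces A's line-major branching loop with a keyword-major pass structure: one boolean pass per
-- keyword OR-ing a bit into per-line masks, a precomputed mask->bodies table, then positional numbering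
-- (objective: alternative).


-- ===== PORT A =====
-- f"TC_{n:03}: {body}"  (the shared f-string of both Pythons; counter is always ≥ 1 so :03 = zfill 3)
def gtcFmt (n : Int) (body : String) : String :=
  String.ofList ("TC_".toList ++ PySem.Chars.zfill (PySem.Int.toChars n) 3 ++ (": ".toList ++ body.toList))

-- one iteration of A's for-loop, state = (test_cases, tc_counter)
def gtcStep (st : List String × Int) (rawLine : List Char) : List String × Int :=
  let line := PySem.Chars.lower (PySem.Chars.strip rawLine)
  if line = [] then st
  else
    let st :=
      if PySem.Chars.isIn "login".toList line || PySem.Chars.isIn "email".toList line then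
        (st.1 ++ [gtcFmt st.2 "Enter valid email and password -> Login Successful",
                  gtcFmt (st.2 + 1) "enter invalid password -> Show Error Message",
                  gtcFmt (st.2 + 2) "Leave email field -> show required field message"], st.2 + 3)
      else st
    let st :=
      if PySem.Chars.isIn "submit".toList line then
        (st.1 ++ [gtcFmt st.2 "click submit without filling fields -> show error message"], st.2 + 1)
      else st
    if PySem.Chars.isIn "password".toList line then
      (st.1 ++ [gtcFmt st.2 "Enter special characters in password field -> reject login attempt"], st.2 + 1)
    else st

def generate_test_case (requirement_text : String) : List String :=
  let lines := PySem.Chars.splitOn (PySem.Chars.strip requirement_text.toList) ".".toList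
  let st := lines.foldl gtcStep ([], 1)
  if st.1 = [] then ["No specific testcases generated from the input."] else st.1

-- ===== PORT B =====
-- KEYWORD_BITS: each keyword contributes one bit of a per-line mask
def gtcKeywordBits : List (List Char × Int) :=
  [("login".toList, 1), ("email".toList, 1), ("submit".toList, 2), ("password".toList, 4)]

def gtcTLogin : List String :=
  ["Enter valid email and password -> Login Successful",
   "enter invalid password -> Show Error Message",
   "Leave email field -> show required field message"]
def gtcTSubmit : List String :=
  ["click submit without filling fields -> show error message"]
def gtcTPassword : List String :=
  ["Enter special characters in password field -> reject login attempt"]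

-- the body of the BODIES_BY_MASK comprehension
def gtcBodiesFor (m : Int) : List String :=
  (if Int.land m 1 ≠ 0 then gtcTLogin else []) ++
  (if Int.land m 2 ≠ 0 then gtcTSubmit else []) ++
  (if Int.land m 4 ≠ 0 then gtcTPassword else [])

-- BODIES_BY_MASK = {m: … for m in range(8)}
def gtcBodiesByMask : PySem.Dict Int (List String) :=
  PySem.Dict.ofList ((PySem.List.pyRange 0 8 1).map (fun m => (m, gtcBodiesFor m)))

-- one keyword pass: masks = [m | bit if kw in line else m for m, line in zip(masks, lines)]
def gtcMaskStep (lines : List (List Char)) (masks : List Int) (kwbit : List Char × Int) : List Int :=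
  List.zipWith (fun m line => if PySem.Chars.isIn kwbit.1 line then Int.lor m kwbit.2 else m) masks lines

def generate_test_case_alt (requirement_text : String) : List String :=
  let lines := (PySem.Chars.splitOn (PySem.Chars.strip requirement_text.toList) ".".toList).map
      (fun l => PySem.Chars.lower (PySem.Chars.strip l))
  let masks := gtcKeywordBits.foldl (gtcMaskStep lines) (List.replicate lines.length 0)
  -- BODIES_BY_MASK[m]: every mask lies in range(8), so the key is always present (getD [] never fires)
  let bodies := masks.flatMap (fun m => (gtcBodiesByMask.get? m).getD [])
  if bodies = [] then ["No specific testcases generated from the input."]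
  else (PySem.List.enumerate bodies 1).map (fun p => gtcFmt p.1 p.2)

-- ===== PRECONDITION & SPEC =====
def Spec_generate_test_case (requirement_text : String) (out : List String) : Prop := out = generate_test_case_alt requirement_text
instance (requirement_text : String) (out : List String) : Decidable (Spec_generate_test_case requirement_text out) := by unfold Spec_generate_test_case; infer_instance

-- ===== CLAIM (what is proved, stated in full; the proofs are below) =====
def Claim_equal_generate_test_case : Prop := ∀ (requirement_text : String), Dom_generate_test_case requirement_text → Spec_generate_test_case requirement_text (generate_test_case requirement_text)

-- ===== LEMMAS AND PROOFS =====

-- bodies contributed by one already-processed (stripped+lowered) line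
def gtcProcBodies (line : List Char) : List String :=
  (if PySem.Chars.isIn "login".toList line || PySem.Chars.isIn "email".toList line then gtcTLogin else []) ++
  (if PySem.Chars.isIn "submit".toList line then gtcTSubmit else []) ++
  (if PySem.Chars.isIn "password".toList line then gtcTPassword else [])

-- bodies contributed by one raw line of A's loop
def gtcLineBodies (raw : List Char) : List String :=
  gtcProcBodies (PySem.Chars.lower (PySem.Chars.strip raw))

-- the mask B's keyword passes accumulate for one processed line
def gtcLineMask (line : List Char) : Int :=
  gtcKeywordBits.foldl (fun m kb => if PySem.Chars.isIn kb.1 line then Int.lor m kb.2 else m) 0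

-- numbering a body list starting at n
def gtcNum (n : Int) (bodies : List String) : List String :=
  (PySem.List.enumerate bodies n).map (fun p => gtcFmt p.1 p.2)

theorem gtcEnum_eq_nil_iff {α : Type} (xs : List α) (s : Int) :
    PySem.List.enumerate xs s = [] ↔ xs = [] := by
  cases xs <;> simp [PySem.List.enumerate_cons, PySem.List.enumerate_nil]

theorem gtcNum_append (n : Int) (xs ys : List String) :
    gtcNum n (xs ++ ys) = gtcNum n xs ++ gtcNum (n + xs.length) ys := by
  simp [gtcNum, PySem.List.enumerate_append]

-- one line of A's loop produces exactly the numbered bodies of that line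
theorem gtcStep_eq (tcs : List String) (c : Int) (raw : List Char) :
    gtcStep (tcs, c) raw = (tcs ++ gtcNum c (gtcLineBodies raw), c + (gtcLineBodies raw).length) := by
  unfold gtcStep gtcLineBodies gtcProcBodies
  by_cases h0 : PySem.Chars.lower (PySem.Chars.strip raw) = []
  · rw [h0]
    simp [gtcNum, show PySem.Chars.isIn ['l','o','g','i','n'] [] = false from by decide,
      show PySem.Chars.isIn ['e','m','a','i','l'] [] = false from by decide,
      show PySem.Chars.isIn ['s','u','b','m','i','t'] [] = false from by decide,
      show PySem.Chars.isIn ['p','a','s','s','w','o','r','d'] [] = false from by decide]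
  · simp only [h0, if_false]
    by_cases h1 : (PySem.Chars.isIn "login".toList (PySem.Chars.lower (PySem.Chars.strip raw)) ||
        PySem.Chars.isIn "email".toList (PySem.Chars.lower (PySem.Chars.strip raw))) = true <;>
      by_cases h2 : PySem.Chars.isIn "submit".toList (PySem.Chars.lower (PySem.Chars.strip raw)) = true <;>
      by_cases h3 : PySem.Chars.isIn "password".toList (PySem.Chars.lower (PySem.Chars.strip raw)) = true <;>
      simp only [h1, h2, h3, if_true, if_false, Bool.false_eq_true, gtcTLogin, gtcTSubmit,
        gtcTPassword, List.append_nil, List.nil_append, List.append_assoc, gtcNum,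
        PySem.List.enumerate_cons, PySem.List.enumerate_nil, List.map_cons, List.map_nil,
        List.length_cons, List.length_nil, List.cons_append] <;>
      norm_num [add_assoc, Prod.ext_iff]

-- A's whole loop = per-line bodies flattened and numbered from the incoming counter
theorem gtc_loop (lines : List (List Char)) (tcs : List String) (c : Int) :
    lines.foldl gtcStep (tcs, c) =
      (tcs ++ gtcNum c (lines.flatMap gtcLineBodies),
       c + (lines.flatMap gtcLineBodies).length) := by
  induction lines generalizing tcs c with
  | nil => simp [gtcNum]
  | cons raw rest ih =>
    simp only [List.foldl_cons, gtcStep_eq, ih, List.flatMap_cons]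
    rw [gtcNum_append]
    simp [List.append_assoc]
    ring

-- B's four keyword passes compute exactly the per-line masks
theorem gtc_masks (lines : List (List Char)) :
    gtcKeywordBits.foldl (gtcMaskStep lines) (List.replicate lines.length 0) =
      lines.map gtcLineMask := by
  induction lines with
  | nil => rfl
  | cons l ls ih =>
    simp only [gtcKeywordBits, List.foldl_cons, List.foldl_nil, gtcMaskStep] at ih ⊢
    simp only [List.length_cons, List.replicate_succ, List.zipWith_cons_cons, List.map_cons, ih,
      gtcLineMask, gtcKeywordBits, List.foldl_cons, List.foldl_nil]

-- the table lookup at a line's mask yields exactly that line's bodies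
theorem gtc_lookup (line : List Char) :
    ((gtcBodiesByMask.get? (gtcLineMask line)).getD []) = gtcProcBodies line := by
  unfold gtcLineMask gtcProcBodies
  by_cases h1 : PySem.Chars.isIn "login".toList line = true <;>
    by_cases h2 : PySem.Chars.isIn "email".toList line = true <;>
    by_cases h3 : PySem.Chars.isIn "submit".toList line = true <;>
    by_cases h4 : PySem.Chars.isIn "password".toList line = true <;>
    simp only [gtcKeywordBits, List.foldl_cons, List.foldl_nil, h1, h2, h3, h4, if_true,
      if_false, Bool.false_eq_true, Bool.or_self, Bool.or_false, Bool.or_true] <;> rfl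

-- ===== VERDICT (by name: the statement is the Claim_ definition above) =====
theorem generate_test_case_spec : Claim_equal_generate_test_case := by
  intro requirement_text _
  unfold Spec_generate_test_case generate_test_case generate_test_case_alt
  simp only [gtc_loop, gtc_masks, List.nil_append, List.flatMap_map, List.map_map]
  have hb : ∀ raws : List (List Char),
      raws.flatMap (fun raw =>
        ((gtcBodiesByMask.get? (gtcLineMask (PySem.Chars.lower (PySem.Chars.strip raw)))).getD []))
      = raws.flatMap gtcLineBodies := by
    intro raws
    apply List.flatMap_congr
    intro raw _
    rw [gtc_lookup]
    rfl
  simp only [Function.comp_def]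
  rw [hb]
  by_cases h : (PySem.Chars.splitOn (PySem.Chars.strip requirement_text.toList) ".".toList).flatMap
      gtcLineBodies = []
  · simp only [h, gtcNum, PySem.List.enumerate_nil, List.map_nil]
  · have he : PySem.List.enumerate ((PySem.Chars.splitOn (PySem.Chars.strip
        requirement_text.toList) ".".toList).flatMap gtcLineBodies) 1 ≠ [] := by
      simpa [gtcEnum_eq_nil_iff] using h
    simp only [gtcNum, if_neg h, if_neg (fun hm => he (List.map_eq_nil_iff.mp hm))]
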